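-- pv_equiv track=rewrite | github.com/vibrant700/Machine-Intelligence | problem_2/src/Linear/function.py | calculate_inversion_number
-- ===== SOURCE A (Python) =====
-- def calculate_inversion_number(f_input):
--     result = 0
--     for i in range(len(f_input)):
--         if f_input[i] == 0:
--             continue
--         for j in range(i):
--             if f_input[j] > f_input[i]:
--                 result += 1
--             else:
--                 pass
--     return result
-- ===== SOURCE B (Python) =====
-- def _bisect_right(a, x):
--     # index of the first element of the ascending list a that is > x
--     lo = 0
--     hi = len(a)
--     while lo < hi:
--         mid = (lo + hi) // 2
--         if a[mid] <= x:
--             lo = mid + 1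
--         else:
--             hi = mid
--     return lo
--
--
-- def calculate_inversion_number(f_input):
--     result = 0
--     seen = []  # sorted ascending multiset of the elements already passed
--     for x in f_input:
--         pos = _bisect_right(seen, x)
--         if x != 0:
--             result += len(seen) - pos
--         seen.insert(pos, x)
--     return result
-- ===== Notes on version B (the rewrite author's own statement) =====
-- stated objective: faster
-- what changed: Replaces the quadratic nested index loops with a single left-to-right pass that keeps the already-seen elements in a sorted list and counts the greater predecessors of each nonzero element by hand-written binary search.
import Mathlib
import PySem

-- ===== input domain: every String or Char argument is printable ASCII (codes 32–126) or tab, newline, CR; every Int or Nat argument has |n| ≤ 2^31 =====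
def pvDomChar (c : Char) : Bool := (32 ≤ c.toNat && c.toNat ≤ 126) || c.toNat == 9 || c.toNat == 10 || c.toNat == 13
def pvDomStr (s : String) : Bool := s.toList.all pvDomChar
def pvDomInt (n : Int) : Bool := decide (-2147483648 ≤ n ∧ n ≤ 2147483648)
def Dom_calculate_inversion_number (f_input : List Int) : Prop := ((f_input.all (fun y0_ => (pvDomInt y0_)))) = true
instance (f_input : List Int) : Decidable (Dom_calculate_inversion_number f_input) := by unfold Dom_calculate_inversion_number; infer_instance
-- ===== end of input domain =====

-- B replaces A's quadratic nested index loops by one left-to-right pass that keeps the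
-- already-seen elements in a sorted list and binary-searches the number of greater
-- predecessors of each nonzero element (objective: faster).


-- ===== PORT A =====
def calculate_inversion_number (f_input : List Int) : Int :=
  (PySem.List.pyRange 0 (f_input.length : Int) 1).foldl (fun result i =>
    if PySem.List.pyGetD f_input i 0 = 0 then result
    else (PySem.List.pyRange 0 i 1).foldl (fun r j =>
      if PySem.List.pyGetD f_input j 0 > PySem.List.pyGetD f_input i 0 then r + 1 else r) result) 0

-- ===== PORT B =====
-- the hand-written binary search of Source B, ported step for step; the indices it probes
-- stay inside [0, a.length), so getD is exact there, and lo, hi are always ≥ 0, so Nat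
-- mirrors Python's ints and (lo + hi) / 2 is Python's (lo + hi) // 2
def bisectRightLoop (a : List Int) (x : Int) (lo hi : Nat) : Nat :=
  if _h : lo < hi then
    let mid := (lo + hi) / 2
    if a.getD mid 0 ≤ x then bisectRightLoop a x (mid + 1) hi
    else bisectRightLoop a x lo mid
  else lo
termination_by hi - lo
decreasing_by all_goals omega

def calculate_inversion_number_alt (f_input : List Int) : Int :=
  (f_input.foldl (fun (st : Int × List Int) x =>
    let pos := bisectRightLoop st.2 x 0 st.2.length
    let result := if x ≠ 0 then st.1 + ((st.2.length : Int) - (pos : Int)) else st.1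
    (result, PySem.List.insert st.2 (pos : Int) x)) (0, ([] : List Int))).1

-- ===== PRECONDITION & SPEC =====
def Spec_calculate_inversion_number (f_input : List Int) (out : Int) : Prop := out = calculate_inversion_number_alt f_input
instance (f_input : List Int) (out : Int) : Decidable (Spec_calculate_inversion_number f_input out) := by unfold Spec_calculate_inversion_number; infer_instance

-- ===== CLAIM (what is proved, stated in full; the proofs are below) =====
def Claim_equal_calculate_inversion_number : Prop := ∀ (f_input : List Int), Dom_calculate_inversion_number f_input → Spec_calculate_inversion_number f_input (calculate_inversion_number f_input)

-- ===== LEMMAS AND PROOFS =====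

-- common reference value: inversions of suf against the growing prefix pref
def invSpec : List Int → List Int → Int
  | _, [] => 0
  | pref, x :: r =>
      (if x ≠ 0 then (pref.countP (fun y => decide (x < y)) : Int) else 0) + invSpec (pref ++ [x]) r

-- ---- A side ----

lemma inner_fold_eq (pref rest : List Int) (v res : Int) :
    (PySem.List.pyRange 0 (pref.length : Int) 1).foldl
      (fun r j => if PySem.List.pyGetD (pref ++ rest) j 0 > v then r + 1 else r) res
      = res + (pref.countP (fun y => decide (v < y)) : Int) := by
  rw [PySem.List.foldl_congr_mem _ _
      (fun r j => if PySem.List.pyGetD pref j 0 > v then r + 1 else r) res ?_]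
  · rw [PySem.List.foldl_pyRange_zero_pyGetD' pref 0 (fun r y => if y > v then r + 1 else r) res]
    rw [PySem.List.foldl_ite_add_one]
  · intro acc j hj
    rw [PySem.List.mem_pyRange_one] at hj
    simp only
    rw [PySem.List.pyGetD_eq_getElem (pref ++ rest) 0 hj.1 (by simp; omega),
        PySem.List.pyGetD_eq_getElem pref 0 hj.1 hj.2]
    rw [List.getElem_append_left (by omega)]

lemma A_outer (f : List Int) (suf : List Int) : ∀ (pref : List Int), f = pref ++ suf → ∀ (res : Int),
    (PySem.List.pyRange (pref.length : Int) (f.length : Int) 1).foldl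
      (fun result i =>
        if PySem.List.pyGetD f i 0 = 0 then result
        else (PySem.List.pyRange 0 i 1).foldl (fun r j =>
          if PySem.List.pyGetD f j 0 > PySem.List.pyGetD f i 0 then r + 1 else r) result) res
      = res + invSpec pref suf := by
  induction suf with
  | nil => intro pref hf res; subst hf; simp [invSpec, PySem.List.pyRange_one_eq_nil le_rfl]
  | cons x r ih =>
    intro pref hf res
    have hlen : f.length = pref.length + (x :: r).length := by rw [hf]; simp
    rw [PySem.List.pyRange_one_cons (by simp [hlen])]
    rw [List.foldl_cons]
    have hget : PySem.List.pyGetD f (pref.length : Int) 0 = x := by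
      rw [PySem.List.pyGetD_eq_getElem f 0 (by positivity) (by simp [hlen])]
      simp [hf]
    have hstep : ((pref.length : Int) + 1) = ((pref ++ [x]).length : Int) := by simp
    have hf' : f = (pref ++ [x]) ++ r := by simp [hf]
    rw [hget]
    by_cases hx : x = 0
    · rw [if_pos hx]
      rw [hstep, ih (pref ++ [x]) hf' res]
      simp [invSpec, hx]
    · rw [if_neg hx]
      have hin := inner_fold_eq pref (x :: r) x res
      rw [← hf] at hin
      rw [hin, hstep, ih (pref ++ [x]) hf' _]
      simp [invSpec, hx]
      ring

-- ---- B side: the binary search finds countP (· ≤ x) on a sorted list ----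

lemma countP_le_iff (a : List Int) (x : Int) (hs : a.Pairwise (· ≤ ·)) :
    ∀ i, i < a.length → (a.getD i 0 ≤ x ↔ i < a.countP (fun y => decide (y ≤ x))) := by
  induction a with
  | nil => simp
  | cons y t ih =>
    intro i hi
    rcases List.pairwise_cons.mp hs with ⟨hy, ht⟩
    by_cases hyx : y ≤ x
    · rw [List.countP_cons_of_pos (p := fun y => decide (y ≤ x)) (pa := by simpa using hyx)]
      cases i with
      | zero => simpa using hyx
      | succ k =>
        simp only [List.getD_cons_succ]
        rw [ih ht k (by simpa using hi)]
        omega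
    · have htzero : t.countP (fun y => decide (y ≤ x)) = 0 := by
        apply List.countP_eq_zero.mpr
        intro z hz
        simp only [decide_eq_true_eq]
        have := hy z hz
        omega
      rw [List.countP_cons_of_neg (p := fun y => decide (y ≤ x)) (pa := by simpa using hyx), htzero]
      cases i with
      | zero => simpa using hyx
      | succ k =>
        simp only [List.getD_cons_succ]
        constructor
        · intro h
          exfalso
          have hk : k < t.length := by simpa using hi
          have : t[k] ≤ x := by rwa [List.getD_eq_getElem _ _ hk] at h
          have := hy t[k] (List.getElem_mem hk)
          omega
        · omega

lemma bisectRightLoop_eq (a : List Int) (x : Int) (hs : a.Pairwise (· ≤ ·)) :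
    ∀ lo hi, lo ≤ a.countP (fun y => decide (y ≤ x)) →
      a.countP (fun y => decide (y ≤ x)) ≤ hi → hi ≤ a.length →
      bisectRightLoop a x lo hi = a.countP (fun y => decide (y ≤ x)) := by
  intro lo hi
  induction lo, hi using bisectRightLoop.induct a x with
  | case1 lo hi h mid hmid ih =>
    intro h1 h2 h3
    rw [bisectRightLoop, dif_pos h, if_pos (by simpa [mid] using hmid)]
    apply ih
    · have hmlt : mid < a.length := by omega
      have := (countP_le_iff a x hs mid hmlt).mp hmid
      omega
    · exact h2
    · exact h3
  | case2 lo hi h mid hmid ih =>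
    intro h1 h2 h3
    rw [bisectRightLoop, dif_pos h, if_neg (by simpa [mid] using hmid)]
    apply ih
    · exact h1
    · have hmlt : mid < a.length := by omega
      have := (countP_le_iff a x hs mid hmlt)
      omega
    · omega
  | case3 lo hi h =>
    intro h1 h2 h3
    rw [bisectRightLoop, dif_neg h]
    omega

lemma insertIdx_eq_take_cons_drop (l : List Int) (x : Int) (c : Nat) :
    c ≤ l.length → l.insertIdx c x = l.take c ++ x :: l.drop c := by
  induction c generalizing l with
  | zero => intro _; simp [List.insertIdx]
  | succ k ihk =>
    intro h
    cases l with
    | nil => simp at h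
    | cons y t => simp [List.insertIdx_succ_cons, ihk t (by simpa using h)]

-- inserting x at position countP (· ≤ x) keeps the list sorted
lemma insert_sorted (l : List Int) (x : Int) (hs : l.Pairwise (· ≤ ·)) :
    (l.take (l.countP (fun y => decide (y ≤ x))) ++
      x :: l.drop (l.countP (fun y => decide (y ≤ x)))).Pairwise (· ≤ ·) := by
  set c := l.countP (fun y => decide (y ≤ x)) with hc
  have hcle : c ≤ l.length := List.countP_le_length
  have htake_le : ∀ a ∈ l.take c, a ≤ x := by
    intro a ha
    rcases List.mem_iff_getElem.mp ha with ⟨i, hilt, hia⟩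
    have hil : i < l.length := by simp at hilt; omega
    have hic : i < c := by simp at hilt; omega
    have := (countP_le_iff l x hs i hil).mpr hic
    rw [List.getD_eq_getElem _ _ hil] at this
    rw [← hia, List.getElem_take]
    exact this
  have hdrop_ge : ∀ b ∈ l.drop c, x ≤ b := by
    intro b hb
    rcases List.mem_iff_getElem.mp hb with ⟨j, hjlt, hjb⟩
    have hjl : c + j < l.length := by simp at hjlt; omega
    have hnc : ¬ (c + j < c) := by omega
    have := (countP_le_iff l x hs (c + j) hjl)
    rw [List.getD_eq_getElem _ _ hjl] at this
    have hgt : ¬ (l[c + j] ≤ x) := fun hle => hnc (this.mp hle)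
    rw [← hjb, List.getElem_drop]
    omega
  rw [List.pairwise_append]
  refine ⟨hs.sublist (List.take_sublist c l), ?_, ?_⟩
  · rw [List.pairwise_cons]
    exact ⟨hdrop_ge, hs.sublist (List.drop_sublist c l)⟩
  · intro a ha b hb
    rcases List.mem_cons.mp hb with hbx | hbd
    · rw [hbx]; exact htake_le a ha
    · rw [← List.take_append_drop c l, List.pairwise_append] at hs
      exact hs.2.2 a ha b hbd

lemma count_gt_eq (l : List Int) (x : Int) :
    (l.length : Int) - (l.countP (fun y => decide (y ≤ x)) : Int)
      = (l.countP (fun y => decide (x < y)) : Int) := by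
  have h := List.length_eq_countP_add_countP (fun y => decide (y ≤ x)) (l := l)
  have h2 : l.countP (fun a => decide ¬(decide (a ≤ x) = true))
      = l.countP (fun y => decide (x < y)) := by
    apply List.countP_congr
    intro a _
    simp only [decide_eq_true_eq]
    constructor <;> (intro; omega)
  rw [h2] at h
  omega

lemma B_loop (suf : List Int) :
    ∀ (pref seen : List Int) (res : Int), seen.Perm pref → seen.Pairwise (· ≤ ·) →
      (suf.foldl (fun (st : Int × List Int) x =>
        let pos := bisectRightLoop st.2 x 0 st.2.length
        let result := if x ≠ 0 then st.1 + ((st.2.length : Int) - (pos : Int)) else st.1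
        (result, PySem.List.insert st.2 (pos : Int) x)) (res, seen)).1
      = res + invSpec pref suf := by
  induction suf with
  | nil => intro pref seen res _ _; simp [invSpec]
  | cons x r ih =>
    intro pref seen res hperm hs
    rw [List.foldl_cons]
    simp only
    have hc : bisectRightLoop seen x 0 seen.length = seen.countP (fun y => decide (y ≤ x)) :=
      bisectRightLoop_eq seen x hs 0 seen.length (Nat.zero_le _) List.countP_le_length le_rfl
    set c := seen.countP (fun y => decide (y ≤ x)) with hcdef
    have hcle : c ≤ seen.length := List.countP_le_length
    have hins : PySem.List.insert seen ((bisectRightLoop seen x 0 seen.length : Nat) : Int) x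
        = seen.take c ++ x :: seen.drop c := by
      rw [hc]; exact PySem.List.insert_natCast seen c x hcle
    have hperm' : (seen.take c ++ x :: seen.drop c).Perm (pref ++ [x]) := by
      have h1 : (seen.take c ++ x :: seen.drop c).Perm (x :: seen) := by
        rw [← insertIdx_eq_take_cons_drop seen x c hcle]
        exact List.perm_insertIdx x seen hcle
      exact h1.trans ((hperm.cons x).trans (List.perm_append_singleton x pref).symm)
    have hsorted' := insert_sorted seen x hs
    rw [hins]
    rw [ih (pref ++ [x]) _ _ hperm' hsorted']
    by_cases hx : x = 0
    · simp [invSpec, hx]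
    · rw [if_pos hx, hc, hcdef]
      rw [count_gt_eq seen x, hperm.countP_eq]
      simp [invSpec, hx]
      ring

-- ===== VERDICT (by name: the statement is the Claim_ definition above) =====
theorem calculate_inversion_number_spec : Claim_equal_calculate_inversion_number := by
  intro f _
  unfold Spec_calculate_inversion_number
  have hA := A_outer f f [] rfl 0
  have hB := B_loop f [] [] 0 (List.Perm.refl _) (by simp)
  simp only [List.length_nil, Nat.cast_zero, zero_add] at hA hB
  unfold calculate_inversion_number calculate_inversion_number_alt
  rw [hA, hB]
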